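-- pv_equiv track=rewrite | github.com/merouaneagar/canopsis | sources/canopsis/canopsis/webcore/services/weather.py | watcher_status
-- ===== SOURCE A (Python) =====
-- def watcher_status(watcher, pbehavior_eids_merged):
--     """
--     watcher_status
--
--     :param dict watcher: watcher entity document
--     :param set pbehavior_eids_merged: set with eids
--     :returns: has active pb status and has all active pb status
--     :rtype: (bool, bool)
--     """
--     bool_set = set([])
--     for entity_id in watcher['depends']:
--         bool_set.add(entity_id in pbehavior_eids_merged)
--
--     if True in bool_set and False in bool_set:
--         # has_active_pbh
--         return True, False
--     elif True in bool_set: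
--         # has_all_active_pbh
--         return False, True
--
--     return False, False
-- ===== SOURCE B (Python) =====
-- def watcher_status(watcher, pbehavior_eids_merged):
--     uniq = set(watcher['depends'])
--     covered = uniq & set(pbehavior_eids_merged)
--     return (bool(covered) and covered != uniq, bool(covered) and covered == uniq)
-- ===== Notes on version B (the rewrite author's own statement) =====
-- stated objective: alternative
-- what changed: Replaces A's per-element loop that accumulates a set of membership booleans with set algebra: deduplicate the dependencies, intersect with the pbehavior set once, and read both flags off the intersection's emptiness and its equality with the full dependency set.
import Mathlib
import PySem

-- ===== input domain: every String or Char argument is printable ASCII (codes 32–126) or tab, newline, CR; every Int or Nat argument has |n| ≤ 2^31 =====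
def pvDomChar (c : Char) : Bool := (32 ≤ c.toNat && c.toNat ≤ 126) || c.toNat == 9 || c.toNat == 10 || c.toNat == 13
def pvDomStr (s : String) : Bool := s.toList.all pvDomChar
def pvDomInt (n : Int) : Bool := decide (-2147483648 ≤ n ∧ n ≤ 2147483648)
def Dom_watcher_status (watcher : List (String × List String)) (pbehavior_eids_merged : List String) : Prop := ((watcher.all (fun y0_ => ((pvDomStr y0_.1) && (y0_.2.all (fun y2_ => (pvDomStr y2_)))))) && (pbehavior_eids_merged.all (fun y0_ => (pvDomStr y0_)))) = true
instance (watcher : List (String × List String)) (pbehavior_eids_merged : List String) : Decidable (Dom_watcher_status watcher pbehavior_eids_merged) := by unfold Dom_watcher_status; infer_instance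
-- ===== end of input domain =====

-- B replaces A's per-element loop accumulating a set of membership booleans with set algebra (dedup, one intersection, emptiness/equality tests) — alternative decomposition, same cost.


-- ===== PORT A =====
def watcher_status (watcher : List (String × List String)) (pbehavior_eids_merged : List String) : Bool × Bool :=
  match (PySem.Dict.mk watcher).get? "depends" with
  | none => (false, false)  -- Python raises KeyError here; excluded by Pre_watcher_status
  | some deps =>
    let bool_set : PySem.Set Bool :=
      deps.foldl (fun s entity_id => PySem.Set.add s (pbehavior_eids_merged.contains entity_id)) PySem.Set.empty
    if PySem.Set.contains bool_set true && PySem.Set.contains bool_set false then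
      (true, false)
    else if PySem.Set.contains bool_set true then
      (false, true)
    else
      (false, false)

-- ===== PORT B =====
def watcher_status_alt (watcher : List (String × List String)) (pbehavior_eids_merged : List String) : Bool × Bool :=
  match (PySem.Dict.mk watcher).get? "depends" with
  | none => (false, false)  -- Python raises KeyError here; excluded by Pre_watcher_status
  | some deps =>
    let uniq : PySem.Set String := PySem.Set.ofList deps
    let covered : PySem.Set String := PySem.Set.inter uniq (PySem.Set.ofList pbehavior_eids_merged)
    (!covered.isEmpty && !(PySem.Set.equal covered uniq), !covered.isEmpty && PySem.Set.equal covered uniq)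

-- ===== PRECONDITION & SPEC =====
-- Pre_: both Pythons raise KeyError when the watcher dict has no 'depends' key.
def Pre_watcher_status (watcher : List (String × List String)) (pbehavior_eids_merged : List String) : Prop :=
  ((PySem.Dict.mk watcher).get? "depends").isSome = true
instance (watcher : List (String × List String)) (pbehavior_eids_merged : List String) : Decidable (Pre_watcher_status watcher pbehavior_eids_merged) := by unfold Pre_watcher_status; infer_instance
def pvWitness_watcher_status : (List (String × List String)) × List String := ([("depends", ["a", "b"])], ["a"])

def Spec_watcher_status (watcher : List (String × List String)) (pbehavior_eids_merged : List String) (out : Bool × Bool) : Prop := out = watcher_status_alt watcher pbehavior_eids_merged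
instance (watcher : List (String × List String)) (pbehavior_eids_merged : List String) (out : Bool × Bool) : Decidable (Spec_watcher_status watcher pbehavior_eids_merged out) := by unfold Spec_watcher_status; infer_instance

-- ===== CLAIM (what is proved, stated in full; the proofs are below) =====
def Claim_equal_watcher_status : Prop := ∀ (watcher : List (String × List String)) (pbehavior_eids_merged : List String), Dom_watcher_status watcher pbehavior_eids_merged → Pre_watcher_status watcher pbehavior_eids_merged → Spec_watcher_status watcher pbehavior_eids_merged (watcher_status watcher pbehavior_eids_merged)

-- ===== LEMMAS AND PROOFS =====

-- the accumulated set of booleans contains b iff some membership test produced b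
theorem mem_foldl_add (m : List String) (deps : List String) (s : PySem.Set Bool) (b : Bool) :
    (b ∈ deps.foldl (fun s e => PySem.Set.add s (decide (e ∈ m))) s)
      ↔ (b ∈ s ∨ (deps.any fun e => decide (e ∈ m) == b) = true) := by
  induction deps generalizing s with
  | nil => simp
  | cons d rest ih =>
    simp only [List.foldl_cons, List.any_cons, ih, PySem.Set.mem_add, Bool.or_eq_true,
      beq_iff_eq]
    tauto

-- x is in the intersection set iff it is in deps and in m
theorem mem_covered (deps m : List String) (x : String) :
    x ∈ PySem.Set.inter (PySem.Set.ofList deps) (PySem.Set.ofList m) ↔ (x ∈ deps ∧ x ∈ m) := by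
  simp [PySem.Set.inter, PySem.Set.contains, PySem.Set.mem_ofList, List.mem_filter,
    PySem.Set.mem_ofList]

theorem covered_empty_iff (deps m : List String) :
    (PySem.Set.inter (PySem.Set.ofList deps) (PySem.Set.ofList m)).isEmpty = true
      ↔ ¬ ∃ x, x ∈ deps ∧ x ∈ m := by
  rw [List.isEmpty_iff, List.eq_nil_iff_forall_not_mem]
  constructor
  · rintro h ⟨x, hx⟩; exact h x ((mem_covered deps m x).2 hx)
  · intro h x hx; exact h ⟨x, (mem_covered deps m x).1 hx⟩

theorem covered_equal_iff (deps m : List String) :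
    PySem.Set.equal (PySem.Set.inter (PySem.Set.ofList deps) (PySem.Set.ofList m))
      (PySem.Set.ofList deps) = true ↔ ∀ x ∈ deps, x ∈ m := by
  rw [PySem.Set.equal_iff]
  constructor
  · intro h x hx
    have := (h x).2 ((PySem.Set.mem_ofList _ _).2 hx)
    exact ((mem_covered deps m x).1 this).2
  · intro h x
    constructor
    · intro hx; exact (PySem.Set.mem_ofList _ _).2 ((mem_covered deps m x).1 hx).1
    · intro hx
      have hd := (PySem.Set.mem_ofList _ _).1 hx
      exact (mem_covered deps m x).2 ⟨hd, h x hd⟩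

-- ===== VERDICT (by name: the statement is the Claim_ definition above) =====
theorem watcher_status_spec : Claim_equal_watcher_status := by
  intro watcher m _ _
  unfold Spec_watcher_status watcher_status watcher_status_alt
  cases h : (PySem.Dict.mk watcher).get? "depends" with
  | none => rfl
  | some deps =>
    have hT := mem_foldl_add m deps PySem.Set.empty true
    have hF := mem_foldl_add m deps PySem.Set.empty false
    simp only [PySem.Set.empty, List.not_mem_nil, false_or, beq_true, beq_false] at hT hF
    have hE := covered_empty_iff deps m
    have hQ := covered_equal_iff deps m
    simp only [PySem.Set.contains, List.elem_eq_mem, decide_eq_true_eq]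
    cases hA : deps.any (fun e => decide (e ∈ m)) <;>
      cases hN : deps.any (fun e => !decide (e ∈ m)) <;>
        cases hcE : (PySem.Set.inter (PySem.Set.ofList deps) (PySem.Set.ofList m)).isEmpty <;>
          cases hcQ : PySem.Set.equal (PySem.Set.inter (PySem.Set.ofList deps) (PySem.Set.ofList m)) (PySem.Set.ofList deps) <;>
            simp_all
    all_goals
      first
        | (obtain ⟨x, hx1, hx2⟩ := hE; exact hA x hx1 hx2)
        | (obtain ⟨x, hx1, hx2⟩ := hQ; exact hx2 (hN x hx1))
        | (obtain ⟨x, hx1, hx2⟩ := hA; exact hE x hx1 hx2)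
        | (obtain ⟨x, hx1, hx2⟩ := hN; exact hx2 (hQ x hx1))
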